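-- pv_equiv track=rewrite | github.com/jcatrambone94/Damglorious-Encryption | Source-Code/main.py | check_encrypt
-- ===== SOURCE A (Python) =====
-- def check_encrypt(path):
--     dict = {}
--     key = 0
--     back_key = 0
--     length_of_dict = 0
--     filename = ''
--     for char in path:
--         dict[key] = char
--         key += 1
--     for x in dict:
--         length_of_dict += 1
--         if dict[x] == '.' and x != 0:
--             back_key = x
--     for x in dict:
--         if x == back_key and back_key < length_of_dict - 1:
--             back_key += 1
--             item = dict[back_key]
--             filename = filename + item
--     if filename == 'enc':
--         return True
--     else:
--         return False
-- ===== SOURCE B (Python) =====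
-- def check_encrypt(path):
--     # One pass: last '.' at a positive index (0 if none), then compare the slice after it.
--     i = 0
--     for j, c in enumerate(path):
--         if j != 0 and c == '.':
--             i = j
--     return path[i+1:] == 'enc'
-- ===== Notes on version B (the rewrite author's own statement) =====
-- stated objective: simpler
-- what changed: Replaced the index-to-char dict and three loops (build dict, scan keys for the last qualifying dot, char-by-char suffix rebuild) by a single enumerate pass that finds the last dot at a positive index (0 when none) and one slice comparison against the expected extension.
import Mathlib
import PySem

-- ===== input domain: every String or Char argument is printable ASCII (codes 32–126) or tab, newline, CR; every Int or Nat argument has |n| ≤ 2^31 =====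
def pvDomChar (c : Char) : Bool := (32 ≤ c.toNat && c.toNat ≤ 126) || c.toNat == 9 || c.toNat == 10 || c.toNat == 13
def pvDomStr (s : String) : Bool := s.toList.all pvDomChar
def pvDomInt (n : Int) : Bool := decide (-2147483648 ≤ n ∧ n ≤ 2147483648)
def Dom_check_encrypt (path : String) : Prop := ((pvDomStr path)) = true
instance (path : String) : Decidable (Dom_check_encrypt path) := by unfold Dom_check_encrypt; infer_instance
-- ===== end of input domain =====

-- B replaces A's index→char dict and three loops by one enumerate pass for the last '.' at a
-- positive index (0 when none) and a single slice comparison; objective: simpler.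

-- ===== PORT A =====
-- dict[x] is looked up only at keys present in the dict, so Python's KeyError is unreachable;
-- it is ported as getD with an unused default.
def check_encrypt (path : String) : Bool :=
  let d := (path.toList.foldl
      (fun (st : PySem.Dict Int Char × Int) ch => (st.1.insert st.2 ch, st.2 + 1))
      (PySem.Dict.empty, 0)).1
  let st2 := d.keys.foldl
      (fun (st : Int × Int) x =>
        (st.1 + 1, if d.getD x ' ' == '.' && !(x == 0) then x else st.2))
      (0, 0)
  let st3 := d.keys.foldl
      (fun (st : Int × List Char) x =>
        if x == st.1 && st.1 < st2.1 - 1 then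
          (st.1 + 1, st.2 ++ [d.getD (st.1 + 1) ' '])
        else st)
      (st2.2, [])
  st3.2 == "enc".toList

-- ===== PORT B =====
def check_encrypt_alt (path : String) : Bool :=
  let i := (PySem.List.enumerate path.toList).foldl
      (fun (i : Int) p => if !(p.1 == 0) && p.2 == '.' then p.1 else i) 0
  PySem.Str.slice path (some (i + 1)) none == "enc"

-- ===== PRECONDITION & SPEC =====
def Spec_check_encrypt (path : String) (out : Bool) : Prop := out = check_encrypt_alt path
instance (path : String) (out : Bool) : Decidable (Spec_check_encrypt path out) := by unfold Spec_check_encrypt; infer_instance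

-- ===== CLAIM (what is proved, stated in full; the proofs are below) =====
def Claim_equal_check_encrypt : Prop := ∀ (path : String), Dom_check_encrypt path → Spec_check_encrypt path (check_encrypt path)

-- ===== LEMMAS AND PROOFS =====

-- Loop 1: building the index→char dict appends fresh consecutive keys, so its items list is
-- exactly list(enumerate(path)).
lemma pv_build_items (cs : List Char) : ∀ (d : PySem.Dict Int Char) (k : Int),
    (∀ p ∈ d.items, p.1 < k) →
    ((cs.foldl (fun (st : PySem.Dict Int Char × Int) ch => (st.1.insert st.2 ch, st.2 + 1)) (d, k)).1).items
      = d.items ++ PySem.List.enumerate cs k := by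
  induction cs with
  | nil => intro d k _; simp [PySem.List.enumerate]
  | cons c cs ih =>
    intro d k h
    have hnc : d.contains k = false := by
      cases hc : d.contains k with
      | false => rfl
      | true =>
        have hk : k ∈ d.keys := (PySem.Dict.contains_iff_mem_keys d k).mp hc
        have : ∃ p ∈ d.items, p.1 = k := by
          simpa [PySem.Dict.keys, List.mem_map] using hk
        obtain ⟨p, hp, hpk⟩ := this
        exact absurd (hpk ▸ h p hp) (lt_irrefl k)
    have hins := PySem.Dict.items_insert_of_not_contains d c hnc
    simp only [List.foldl_cons]
    rw [ih (d.insert k c) (k + 1) ?_]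
    · rw [hins, PySem.List.enumerate_cons]; simp
    · intro p hp
      rw [hins] at hp
      rcases List.mem_append.mp hp with h1 | h1
      · exact lt_trans (h p h1) (by omega)
      · rw [List.mem_singleton] at h1; subst h1; show k < k + 1; omega

-- Loop 2 over the keys is B's enumerate fold (plus the length count).
lemma pv_loop2_eq (d : PySem.Dict Int Char) :
    ∀ (l : List (Int × Char)) (len bk : Int), (∀ p ∈ l, d.getD p.1 ' ' = p.2) →
    (l.map (·.1)).foldl
        (fun (st : Int × Int) x => (st.1 + 1, if d.getD x ' ' == '.' && !(x == 0) then x else st.2))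
        (len, bk)
      = (len + l.length,
         l.foldl (fun (i : Int) p => if !(p.1 == 0) && p.2 == '.' then p.1 else i) bk) := by
  intro l
  induction l with
  | nil => intro len bk _; simp
  | cons p l ih =>
    intro len bk h
    have hp : d.getD p.1 ' ' = p.2 := h p (by simp)
    simp only [List.map_cons, List.foldl_cons, hp]
    rw [Bool.and_comm]
    rw [ih (len + 1) _ (fun q hq => h q (by simp [hq]))]
    simp only [List.length_cons]
    congr 1
    push_cast
    omega

-- B's fold keeps its accumulator inside the index range.
lemma pv_foldB_range (n : Int) :
    ∀ (l : List (Int × Char)) (bk : Int), 0 ≤ bk → bk < n → (∀ p ∈ l, 0 ≤ p.1 ∧ p.1 < n) →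
    0 ≤ l.foldl (fun (i : Int) p => if !(p.1 == 0) && p.2 == '.' then p.1 else i) bk ∧
    l.foldl (fun (i : Int) p => if !(p.1 == 0) && p.2 == '.' then p.1 else i) bk < n := by
  intro l
  induction l with
  | nil => intro bk h0 h1 _; exact ⟨h0, h1⟩
  | cons p l ih =>
    intro bk h0 h1 h
    simp only [List.foldl_cons]
    by_cases hc : (!(p.1 == 0) && p.2 == '.') = true
    · rw [hc]
      simp only [if_true]
      exact ih p.1 (h p (by simp)).1 (h p (by simp)).2 (fun q hq => h q (by simp [hq]))
    · rw [Bool.not_eq_true] at hc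
      rw [hc]
      simp only [Bool.false_eq_true, if_false]
      exact ih bk h0 h1 (fun q hq => h q (by simp [hq]))

-- Loop 3 leaves its state alone on keys that never equal back_key.
lemma pv_loop3_skip (d : PySem.Dict Int Char) (L : Int) :
    ∀ (K : List Int) (b : Int) (acc : List Char), b ∉ K →
    K.foldl
        (fun (st : Int × List Char) x =>
          if x == st.1 && st.1 < L - 1 then (st.1 + 1, st.2 ++ [d.getD (st.1 + 1) ' ']) else st)
        (b, acc) = (b, acc) := by
  intro K
  induction K with
  | nil => intro b acc _; rfl
  | cons x K ih =>
    intro b acc hb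
    have hx : (x == b) = false := by
      simp only [beq_eq_false_iff_ne]
      intro h; exact hb (by simp [h])
    simp only [List.foldl_cons, hx, Bool.false_and, Bool.false_eq_true, if_false]
    exact ih b acc (fun h => hb (by simp [h]))

-- From key back_key onwards loop 3 copies out exactly the suffix after back_key.
lemma pv_loop3_chain (cs : List Char) (d : PySem.Dict Int Char)
    (hget : ∀ (j : Nat) (hj : j < cs.length), d.getD (j : Int) ' ' = cs[j]) :
    ∀ (t : Nat) (b : Int) (acc : List Char), 0 ≤ b → b + t = (cs.length : Int) →
    ((PySem.List.pyRange b (cs.length : Int)).foldl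
        (fun (st : Int × List Char) x =>
          if x == st.1 && st.1 < (cs.length : Int) - 1 then (st.1 + 1, st.2 ++ [d.getD (st.1 + 1) ' ']) else st)
        (b, acc)).2 = acc ++ cs.drop (b.toNat + 1) := by
  intro t
  induction t with
  | zero =>
    intro b acc hb ht
    have hbn : b = (cs.length : Int) := by omega
    have hr : PySem.List.pyRange b (cs.length : Int) = [] := by
      apply List.eq_nil_iff_forall_not_mem.mpr
      intro x hx
      rw [PySem.List.mem_pyRange_one] at hx
      omega
    rw [hr]
    have : cs.drop (b.toNat + 1) = [] := List.drop_eq_nil_of_le (by omega)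
    simp [this]
  | succ t ih =>
    intro b acc hb ht
    have hbn : b < (cs.length : Int) := by omega
    rw [PySem.List.pyRange_one_cons hbn]
    simp only [List.foldl_cons, BEq.rfl, Bool.true_and]
    by_cases hlast : b < (cs.length : Int) - 1
    · rw [if_pos (by simpa using hlast)]
      have hj : b.toNat + 1 < cs.length := by omega
      have hbj : b + 1 = ((b.toNat + 1 : Nat) : Int) := by omega
      have hgd : d.getD (b + 1) ' ' = cs[b.toNat + 1] := by
        rw [hbj]; exact hget (b.toNat + 1) hj
      have := ih (b + 1) (acc ++ [d.getD (b + 1) ' ']) (by omega) (by omega)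
      rw [this, hgd]
      have htn : (b + 1).toNat + 1 = b.toNat + 1 + 1 := by omega
      rw [htn, List.drop_eq_getElem_cons hj]
      simp
    · rw [if_neg (by simpa using hlast)]
      have hnot : b ∉ PySem.List.pyRange (b + 1) (cs.length : Int) := by
        rw [PySem.List.mem_pyRange_one]; omega
      rw [pv_loop3_skip d (cs.length : Int) _ b acc hnot]
      have : cs.drop (b.toNat + 1) = [] := List.drop_eq_nil_of_le (by omega)
      simp [this]

-- String == is List Char == of the code points.
lemma pv_beq_toList (s t : String) : (s == t) = (s.toList == t.toList) := by
  cases h : s.toList == t.toList with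
  | true => simp only [beq_iff_eq] at h ⊢; exact String.toList_inj.mp h
  | false =>
    simp only [beq_eq_false_iff_ne] at h ⊢
    intro he; exact h (by rw [he])

-- ===== VERDICT (by name: the statement is the Claim_ definition above) =====
theorem check_encrypt_spec : Claim_equal_check_encrypt := by
  intro path _
  unfold Spec_check_encrypt
  by_cases hemp : path = ""
  · rw [hemp]; decide
  · have hn : 0 < path.toList.length := by
      rcases h : path.toList with _ | _
      · exact absurd (String.toList_eq_nil_iff.mp h) hemp
      · simp
    simp only [check_encrypt, check_encrypt_alt]
    set cs := path.toList with hcs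
    have hitems :
        ((cs.foldl (fun (st : PySem.Dict Int Char × Int) ch => (st.1.insert st.2 ch, st.2 + 1))
            (PySem.Dict.empty, 0)).1).items = PySem.List.enumerate cs 0 := by
      simpa [PySem.Dict.empty] using
        pv_build_items cs PySem.Dict.empty 0 (by intro p hp; simp [PySem.Dict.empty] at hp)
    set d := (cs.foldl (fun (st : PySem.Dict Int Char × Int) ch => (st.1.insert st.2 ch, st.2 + 1))
        (PySem.Dict.empty, 0)).1 with hd
    have hkeys : d.keys = (PySem.List.enumerate cs 0).map (·.1) := by
      show d.items.map (·.1) = _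
      rw [hitems]
    have hnodup : d.keys.Nodup := by
      rw [hkeys]
      have h1 : (PySem.List.enumerate cs 0).Pairwise (fun p q => p.1 < q.1) :=
        PySem.List.pairwise_lt_enumerate cs 0
      have h2' : ((PySem.List.enumerate cs 0).map (fun x => x.1)).Pairwise
          ((· < ·) : Int → Int → Prop) :=
        List.Pairwise.map (fun (x : Int × Char) => x.1) (fun _ _ h => h) h1
      exact h2'.imp (fun h => ne_of_lt h)
    have hget : ∀ (j : Nat) (hj : j < cs.length), d.getD (j : Int) ' ' = cs[j] := by
      intro j hj
      apply PySem.Dict.getD_of_mem_items d _ hnodup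
      rw [hitems, PySem.List.mem_enumerate_iff]
      exact ⟨j, hj, by simp⟩
    have hmem : ∀ p ∈ PySem.List.enumerate cs 0, d.getD p.1 ' ' = p.2 := by
      intro p hp
      rw [PySem.List.mem_enumerate_iff] at hp
      obtain ⟨k, hk, rfl⟩ := hp
      simpa using hget k hk
    have h2 := pv_loop2_eq d (PySem.List.enumerate cs 0) 0 0 hmem
    rw [hkeys, h2]
    dsimp only
    simp only [PySem.List.length_enumerate, zero_add]
    set i := (PySem.List.enumerate cs 0).foldl
        (fun (i : Int) p => if !(p.1 == 0) && p.2 == '.' then p.1 else i) 0 with hi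
    have hrange : 0 ≤ i ∧ i < (cs.length : Int) := by
      rw [hi]
      apply pv_foldB_range (cs.length : Int) (PySem.List.enumerate cs 0) 0 le_rfl
        (by exact_mod_cast hn)
      intro p hp
      rw [PySem.List.mem_enumerate_iff] at hp
      obtain ⟨k, hk, rfl⟩ := hp
      exact ⟨by push_cast; omega, by push_cast; omega⟩
    rw [PySem.List.map_fst_enumerate, zero_add]
    rw [PySem.List.pyRange_one_append 0 i (cs.length : Int) hrange.1 (le_of_lt hrange.2),
      List.foldl_append]
    rw [pv_loop3_skip d (cs.length : Int) (PySem.List.pyRange 0 i) i []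
      (by rw [PySem.List.mem_pyRange_one]; omega)]
    have hchain := pv_loop3_chain cs d hget (cs.length - i.toNat) i [] hrange.1 (by omega)
    rw [hchain]
    rw [pv_beq_toList, PySem.Str.toList_slice, PySem.Chars.slice_eq_listSlice,
      PySem.List.slice_from (xs := path.toList) (a := i + 1) (by omega), ← hcs]
    have htn : (i + 1).toNat = i.toNat + 1 := by omega
    rw [htn]
    simp
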